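-- pv_equiv track=rewrite | github.com/shehral/continuum-nlp | apps/api/agents/interview.py | _determine_next_state_heuristic
-- ===== SOURCE A (Python) =====
-- from enum import Enum
--
-- class InterviewState(str, Enum):
--     OPENING = "opening"
--     TRIGGER = "trigger"
--     CONTEXT = "context"
--     OPTIONS = "options"
--     DECISION = "decision"
--     RATIONALE = "rationale"
--     SUMMARIZING = "summarizing"
--
-- def _determine_next_state_heuristic(history: list[dict]) -> InterviewState:
--     """Determine the next state using simple response count heuristic.
--
--     This is a fast, deterministic fallback used when:
--     - fast_mode is enabled
--     - LLM-based detection fails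
--     - Conversation is very short
--
--     Args:
--         history: List of conversation messages
--
--     Returns:
--         The appropriate next state
--     """
--     # Count substantial user responses (>20 chars indicates real content)
--     user_responses = [
--         m for m in history if m["role"] == "user" and len(m["content"]) > 20
--     ]
--
--     response_count = len(user_responses)
--
--     if response_count == 0:
--         return InterviewState.TRIGGER
--     elif response_count == 1:
--         return InterviewState.CONTEXT
--     elif response_count == 2:
--         return InterviewState.OPTIONS
--     elif response_count == 3:
--         return InterviewState.DECISION
--     elif response_count == 4:
--         return InterviewState.RATIONALE
--     else:
--         return InterviewState.SUMMARIZING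
-- ===== SOURCE B (Python) =====
-- from enum import Enum
--
-- class InterviewState(str, Enum):
--     OPENING = "opening"
--     TRIGGER = "trigger"
--     CONTEXT = "context"
--     OPTIONS = "options"
--     DECISION = "decision"
--     RATIONALE = "rationale"
--     SUMMARIZING = "summarizing"
--
-- # Transition table of the interview state machine; SUMMARIZING is absorbing.
-- _NEXT = {
--     InterviewState.TRIGGER: InterviewState.CONTEXT,
--     InterviewState.CONTEXT: InterviewState.OPTIONS,
--     InterviewState.OPTIONS: InterviewState.DECISION,
--     InterviewState.DECISION: InterviewState.RATIONALE,
--     InterviewState.RATIONALE: InterviewState.SUMMARIZING,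
--     InterviewState.SUMMARIZING: InterviewState.SUMMARIZING,
-- }
--
-- def _determine_next_state_heuristic(history: list[dict]) -> InterviewState:
--     """Run the interview state machine over the conversation: start at TRIGGER
--     and take one transition per substantial user response; no count is kept."""
--     state = InterviewState.TRIGGER
--     for m in history:
--         if m["role"] == "user" and len(m["content"]) > 20:
--             state = _NEXT[state]
--     return state
-- ===== Notes on version B (the rewrite author's own statement) =====
-- stated objective: alternative
-- what changed: Replaces A's count-then-branch design (build a filtered list, take its length, map it through a six-way if-elif cascade) with a finite state machine: B keeps no count, it carries the current InterviewState through the history and advances it via a transition table (SUMMARIZING absorbing) on each substantial user response.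
import Mathlib
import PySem

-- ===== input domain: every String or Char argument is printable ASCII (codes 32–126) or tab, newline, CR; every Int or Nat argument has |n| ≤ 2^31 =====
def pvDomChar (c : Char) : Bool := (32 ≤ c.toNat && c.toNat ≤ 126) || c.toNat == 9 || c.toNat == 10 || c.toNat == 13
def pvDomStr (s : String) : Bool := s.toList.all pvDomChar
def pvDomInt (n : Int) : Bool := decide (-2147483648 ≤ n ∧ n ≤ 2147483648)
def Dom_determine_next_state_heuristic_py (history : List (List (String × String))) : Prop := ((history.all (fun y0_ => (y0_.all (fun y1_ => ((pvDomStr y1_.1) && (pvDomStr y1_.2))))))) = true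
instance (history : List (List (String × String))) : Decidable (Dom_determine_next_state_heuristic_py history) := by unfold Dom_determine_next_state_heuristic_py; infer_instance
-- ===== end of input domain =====

-- B replaces A's count-then-branch design with a finite state machine: it keeps no count, carrying the current state through the history and advancing it via a transition table (objective: alternative).


-- ===== PORT A =====
-- m["role"] / m["content"]: first-match association-list lookup (dict convention); KeyError = none, excluded by Pre_.
def pvLookup (m : List (String × String)) (k : String) : Option String :=
  (m.find? (fun p => p.1 == k)).map (·.2)

-- the filter predicate of A's list comprehension (getD "" is only reached outside Pre_, where Python raises)
def pvSubstantial (m : List (String × String)) : Bool :=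
  pvLookup m "role" == some "user" && decide (20 < PySem.Str.len ((pvLookup m "content").getD ""))

def determine_next_state_heuristic_py (history : List (List (String × String))) : String :=
  let user_responses := history.filter pvSubstantial
  let response_count : Int := user_responses.length
  if response_count = 0 then "trigger"
  else if response_count = 1 then "context"
  else if response_count = 2 then "options"
  else if response_count = 3 then "decision"
  else if response_count = 4 then "rationale"
  else "summarizing"

-- ===== PORT B =====
-- B's transition table _NEXT; _NEXT[state] as first-match lookup (the default "" is unreachable: state is always a key).
def pvNextTable : List (String × String) :=
  [("trigger", "context"), ("context", "options"), ("options", "decision"),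
   ("decision", "rationale"), ("rationale", "summarizing"), ("summarizing", "summarizing")]

def pvNext (s : String) : String :=
  ((pvNextTable.find? (fun p => p.1 == s)).map (·.2)).getD ""

def determine_next_state_heuristic_py_alt (history : List (List (String × String))) : String :=
  history.foldl (fun state m => if pvSubstantial m then pvNext state else state) "trigger"

-- ===== PRECONDITION & SPEC =====
-- Pre_ excludes exactly the inputs where Python A raises KeyError: a message without a "role" key,
-- or a "user" message without a "content" key.
def Pre_determine_next_state_heuristic_py (history : List (List (String × String))) : Prop :=
  ∀ m ∈ history, (pvLookup m "role").isSome ∧ (pvLookup m "role" = some "user" → (pvLookup m "content").isSome)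
instance (history : List (List (String × String))) : Decidable (Pre_determine_next_state_heuristic_py history) := by unfold Pre_determine_next_state_heuristic_py; infer_instance

def pvWitness_determine_next_state_heuristic_py : (List (List (String × String))) :=
  [[("role", "user"), ("content", "this is a long substantial answer")], [("role", "assistant"), ("content", "ok")]]

def Spec_determine_next_state_heuristic_py (history : List (List (String × String))) (out : String) : Prop := out = determine_next_state_heuristic_py_alt history
instance (history : List (List (String × String))) (out : String) : Decidable (Spec_determine_next_state_heuristic_py history out) := by unfold Spec_determine_next_state_heuristic_py; infer_instance

-- ===== CLAIM (what is proved, stated in full; the proofs are below) =====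
def Claim_equal_determine_next_state_heuristic_py : Prop := ∀ (history : List (List (String × String))), Dom_determine_next_state_heuristic_py history → Pre_determine_next_state_heuristic_py history → Spec_determine_next_state_heuristic_py history (determine_next_state_heuristic_py history)

-- ===== LEMMAS AND PROOFS =====
-- A's clamped cascade value as a function of the count; the invariant carried by B's state machine.
def pvStateOf (n : Nat) : String :=
  match n with
  | 0 => "trigger" | 1 => "context" | 2 => "options"
  | 3 => "decision" | 4 => "rationale" | _ => "summarizing"

theorem pvNext_stateOf (n : Nat) : pvNext (pvStateOf n) = pvStateOf (n + 1) := by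
  match n with
  | 0 | 1 | 2 | 3 | 4 => decide
  | (k + 5) => simp [pvStateOf]; decide

-- B's fold starting from the state for n ends in the state for n + (number of substantial messages).
theorem pv_fold_stateOf (history : List (List (String × String))) (n : Nat) :
    history.foldl (fun state m => if pvSubstantial m then pvNext state else state) (pvStateOf n)
      = pvStateOf (n + (history.filter pvSubstantial).length) := by
  induction history generalizing n with
  | nil => simp
  | cons m rest ih =>
    simp only [List.foldl_cons, List.filter_cons]
    by_cases h : pvSubstantial m = true
    · rw [if_pos h, pvNext_stateOf, ih]
      congr 1; simp [h]; omega
    · simp [h, ih]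

-- A's cascade on the count n equals pvStateOf n.
theorem pv_cascade_eq (n : Nat) :
    (if (n : Int) = 0 then "trigger"
     else if (n : Int) = 1 then "context"
     else if (n : Int) = 2 then "options"
     else if (n : Int) = 3 then "decision"
     else if (n : Int) = 4 then "rationale"
     else "summarizing") = pvStateOf n := by
  match n with
  | 0 | 1 | 2 | 3 | 4 => decide
  | (k + 5) =>
    simp only [pvStateOf]
    split_ifs with h1 h2 h3 h4 h5 <;> first | (exfalso; omega) | rfl

-- ===== VERDICT (by name: the statement is the Claim_ definition above) =====
theorem determine_next_state_heuristic_py_spec : Claim_equal_determine_next_state_heuristic_py := by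
  intro history _ _
  unfold Spec_determine_next_state_heuristic_py determine_next_state_heuristic_py determine_next_state_heuristic_py_alt
  have h0 : ("trigger" : String) = pvStateOf 0 := rfl
  rw [h0, pv_fold_stateOf, Nat.zero_add]
  exact pv_cascade_eq _
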